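-- pv_equiv track=rewrite | github.com/marcelblijleven/adventofcode | src/adventofcode/year_2015/day_11_2015.py | check_sequential
-- ===== SOURCE A (Python) =====
-- def check_sequential(password: str) -> bool:
--     int_password = [ord(char) for char in password]
--
--     for i, value in enumerate(int_password):
--         try:
--             second = int_password[i + 1]
--             third = int_password[i + 2]
--
--             if (value + 1) == second and (value + 2) == third:
--                 return True
--         except IndexError:
--             return False
--
--     return False
-- ===== SOURCE B (Python) =====
-- def check_sequential(password: str) -> bool:
--     run = 1
--     prev = None
--     for ch in password:
--         if prev is not None and ord(ch) == ord(prev) + 1: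
--             run += 1
--             if run == 3:
--                 return True
--         else:
--             run = 1
--         prev = ch
--     return False
-- ===== Notes on version B (the rewrite author's own statement) =====
-- stated objective: simpler
-- what changed: Replaced the fixed three-element lookahead with try/except IndexError by a one-pass running-streak counter over adjacent characters (run resets to 1 on a non-increment, returns True when the streak reaches 3).
import Mathlib
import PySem

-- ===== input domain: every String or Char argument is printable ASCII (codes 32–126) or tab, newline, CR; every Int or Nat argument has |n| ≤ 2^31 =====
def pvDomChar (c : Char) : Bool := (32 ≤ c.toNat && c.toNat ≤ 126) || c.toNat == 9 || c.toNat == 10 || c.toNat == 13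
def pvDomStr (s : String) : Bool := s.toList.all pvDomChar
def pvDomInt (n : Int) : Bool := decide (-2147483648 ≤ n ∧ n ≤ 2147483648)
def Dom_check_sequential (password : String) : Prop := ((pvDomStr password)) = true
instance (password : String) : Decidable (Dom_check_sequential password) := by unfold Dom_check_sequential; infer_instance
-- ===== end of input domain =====

-- B replaces A's fixed three-element lookahead (indexing i+1/i+2 under try/except) by a
-- one-pass running-streak counter over adjacent characters; objective: simpler.

-- ===== PORT A =====
-- the for-loop over enumerate(int_password); try/except IndexError becomes the match on the two lookups
def pvALoop (int_password : List Int) : List (Int × Int) → Bool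
  | [] => false
  | (i, value) :: rest =>
    match PySem.List.pyGet? int_password (i + 1), PySem.List.pyGet? int_password (i + 2) with
    | some second, some third =>
        if value + 1 = second ∧ value + 2 = third then true else pvALoop int_password rest
    | _, _ => false

def check_sequential (password : String) : Bool :=
  let int_password : List Int := password.toList.map (fun c => (c.toNat : Int))
  pvALoop int_password (PySem.List.enumerate int_password)

-- ===== PORT B =====
-- the for-loop over the characters, carrying (run, prev)
def pvBLoop : List Char → Int → Option Char → Bool
  | [], _, _ => false
  | c :: rest, run, prev =>
    match prev with
    | some p =>
      if (c.toNat : Int) = (p.toNat : Int) + 1 then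
        if run + 1 = 3 then true else pvBLoop rest (run + 1) (some c)
      else pvBLoop rest 1 (some c)
    | none => pvBLoop rest 1 (some c)

def check_sequential_alt (password : String) : Bool :=
  pvBLoop password.toList 1 none

-- ===== PRECONDITION & SPEC =====
def Spec_check_sequential (password : String) (out : Bool) : Prop := out = check_sequential_alt password
instance (password : String) (out : Bool) : Decidable (Spec_check_sequential password out) := by unfold Spec_check_sequential; infer_instance

-- ===== CLAIM (what is proved, stated in full; the proofs are below) =====
def Claim_equal_check_sequential : Prop := ∀ (password : String), Dom_check_sequential password → Spec_check_sequential password (check_sequential password)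

-- ===== LEMMAS AND PROOFS =====

-- reference function both ports are reduced to: does the Int list contain a window a, a+1, a+2?
def pvHasTriple : List Int → Bool
  | a :: b :: c :: rest => (decide (a + 1 = b ∧ a + 2 = c)) || pvHasTriple (b :: c :: rest)
  | _ => false

theorem pvALoop_eq (l : List Int) : ∀ (xs : List Int) (k : ℕ), l.drop k = xs →
    pvALoop l (PySem.List.enumerate xs (k : Int)) = pvHasTriple xs := by
  intro xs
  induction xs with
  | nil => intro k _; simp [PySem.List.enumerate, pvALoop, pvHasTriple]
  | cons x rest ih =>
    intro k hk
    have hrest : l.drop (k + 1) = rest := by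
      have := congrArg List.tail hk
      simpa [← List.drop_one, List.drop_drop, Nat.add_comm] using this
    have hg1 : l[k + 1]? = rest.head? := by
      rw [← List.head?_drop, hrest]
    have hg2 : l[k + 2]? = rest.tail.head? := by
      have : l.drop (k + 2) = rest.tail := by
        have h2 := congrArg List.tail hrest
        rw [show k + 2 = 1 + (k + 1) from by omega, ← List.drop_drop]
        simpa [List.drop_one] using h2
      rw [← List.head?_drop, this]
    have e1 : PySem.List.pyGet? l ((k : Int) + 1) = rest.head? := by
      have : ((k : Int) + 1) = ((k + 1 : ℕ) : Int) := by push_cast; ring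
      rw [this, PySem.List.pyGet?_natCast, hg1]
    have e2 : PySem.List.pyGet? l ((k : Int) + 2) = rest.tail.head? := by
      have : ((k : Int) + 2) = ((k + 2 : ℕ) : Int) := by push_cast; ring
      rw [this, PySem.List.pyGet?_natCast, hg2]
    have henum : PySem.List.enumerate (x :: rest) (k : Int)
        = ((k : Int), x) :: PySem.List.enumerate rest ((k : Int) + 1) := by
      simp [PySem.List.enumerate_cons]
    rw [henum]
    have ihk := ih (k + 1) hrest
    have hcast : ((k + 1 : ℕ) : Int) = (k : Int) + 1 := by push_cast; ring
    rw [hcast] at ihk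
    cases rest with
    | nil => simp [pvALoop, e1, pvHasTriple]
    | cons b rest' =>
      cases rest' with
      | nil => simp [pvALoop, e1, e2, pvHasTriple]
      | cons c rest'' =>
        simp only [pvALoop, e1, e2, List.head?, List.tail]
        by_cases h : x + 1 = b ∧ x + 2 = c
        · simp [pvHasTriple, h]
        · simp only [if_neg h, ihk, pvHasTriple]
          simp [h]

theorem pvBLoop_eq : ∀ (cs : List Char),
    (∀ p : Char, pvBLoop cs 1 (some p) = pvHasTriple ((p :: cs).map (fun c => (c.toNat : Int)))) ∧
    (∀ p q : Char, (q.toNat : Int) = (p.toNat : Int) + 1 →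
      pvBLoop cs 2 (some q) = pvHasTriple ((p :: q :: cs).map (fun c => (c.toNat : Int)))) := by
  intro cs
  induction cs with
  | nil =>
    constructor
    · intro p; simp [pvBLoop, pvHasTriple]
    · intro p q _; simp [pvBLoop, pvHasTriple]
  | cons c rest ih =>
    obtain ⟨ih1, ih2⟩ := ih
    constructor
    · intro p
      by_cases h : (c.toNat : Int) = (p.toNat : Int) + 1
      · simp only [pvBLoop, if_pos h]
        rw [if_neg (by norm_num)]
        exact ih2 p c h
      · simp only [pvBLoop, if_neg h]
        rw [ih1 c]
        cases rest with
        | nil => simp [pvHasTriple]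
        | cons d rest' =>
          have h1 : ¬((p.toNat : Int) + 1 = c.toNat ∧ (p.toNat : Int) + 2 = d.toNat) := by
            rintro ⟨hc, _⟩; exact h hc.symm
          simp [pvHasTriple, h1]
    · intro p q hpq
      by_cases h : (c.toNat : Int) = (q.toNat : Int) + 1
      · have hw : (p.toNat : Int) + 1 = q.toNat ∧ (p.toNat : Int) + 2 = c.toNat := by omega
        simp [pvBLoop, h, pvHasTriple, hw]
      · simp only [pvBLoop, if_neg h]
        rw [ih1 c]
        have h1 : ¬((p.toNat : Int) + 1 = q.toNat ∧ (p.toNat : Int) + 2 = c.toNat) := by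
          rintro ⟨_, hc⟩; apply h; omega
        cases rest with
        | nil => simp [pvHasTriple, h1]
        | cons d rest' =>
          have h2 : ¬((q.toNat : Int) + 1 = c.toNat ∧ (q.toNat : Int) + 2 = d.toNat) := by
            rintro ⟨hc, _⟩; exact h hc.symm
          simp [pvHasTriple, h1, h2]

theorem pvB_eq (cs : List Char) :
    pvBLoop cs 1 none = pvHasTriple (cs.map (fun c => (c.toNat : Int))) := by
  cases cs with
  | nil => simp [pvBLoop, pvHasTriple]
  | cons c rest => simpa [pvBLoop] using (pvBLoop_eq rest).1 c

-- ===== VERDICT (by name: the statement is the Claim_ definition above) =====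
theorem check_sequential_spec : Claim_equal_check_sequential := by
  intro password _
  unfold Spec_check_sequential check_sequential check_sequential_alt
  rw [pvB_eq]
  exact pvALoop_eq _ _ 0 (by simp)
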